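-- pv_equiv track=rewrite | github.com/Project-Logos-2026/Logos | _Dev_Resources/Dev_Tools/Archive/RGE/rge_audit_runner.py | compute_depth
-- ===== SOURCE A (Python) =====
-- def compute_depth(module_path, graph):
--     visited = set()
--     queue = [module_path]
--     depth = 0
--     while queue:
--         next_q = []
--         for m in queue:
--             entry = graph.get(m, {})
--             for dep in entry.get("internal_dependencies", []):
--                 # Map dep string to module path
--                 dep_rel = dep.replace(
--                     "LOGOS_SYSTEM.RUNTIME_BRIDGE.Radial_Genesis_Engine.", ""
--                 ).replace(".", "/") + ".py"
--                 if dep_rel not in visited: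
--                     visited.add(dep_rel)
--                     next_q.append(dep_rel)
--         queue = next_q
--         if queue:
--             depth += 1
--     return depth
-- ===== SOURCE B (Python) =====
-- def compute_depth(module_path, graph):
--     # Monotone fixpoint: repeatedly take the successor set of everything reached
--     # so far until it saturates; the number of growth rounds is the BFS depth.
--     def succs(nodes):
--         out = set()
--         for m in nodes:
--             for dep in graph.get(m, {}).get("internal_dependencies", []):
--                 out.add(dep.replace(
--                     "LOGOS_SYSTEM.RUNTIME_BRIDGE.Radial_Genesis_Engine.", ""
--                 ).replace(".", "/") + ".py")
--         return out
--
--     reach = set()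
--     cur = succs([module_path])
--     depth = 0
--     while not cur.issubset(reach):
--         reach |= cur
--         cur = succs(reach)
--         depth += 1
--     return depth
-- ===== Notes on version B (the rewrite author's own statement) =====
-- stated objective: alternative
-- what changed: Replaced A's BFS (frontier queue plus a visited set deduplicating at discovery time, counting non-empty levels) with a queue-free monotone fixpoint: each round recomputes the successor set of the whole reached set and stops when it saturates, returning the number of growth rounds.
import Mathlib
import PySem

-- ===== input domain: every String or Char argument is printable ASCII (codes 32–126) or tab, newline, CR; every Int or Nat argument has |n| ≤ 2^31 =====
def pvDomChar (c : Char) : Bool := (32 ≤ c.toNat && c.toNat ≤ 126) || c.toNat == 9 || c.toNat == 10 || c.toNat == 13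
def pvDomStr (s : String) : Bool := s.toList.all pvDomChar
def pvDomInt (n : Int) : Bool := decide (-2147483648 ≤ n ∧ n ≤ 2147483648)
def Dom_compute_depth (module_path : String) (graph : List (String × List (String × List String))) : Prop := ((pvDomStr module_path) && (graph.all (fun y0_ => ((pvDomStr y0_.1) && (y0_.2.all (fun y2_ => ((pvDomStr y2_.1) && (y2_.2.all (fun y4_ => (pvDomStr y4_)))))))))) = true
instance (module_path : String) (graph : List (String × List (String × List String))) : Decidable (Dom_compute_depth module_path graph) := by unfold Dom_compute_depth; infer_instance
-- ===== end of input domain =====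

-- B replaces A's frontier-queue BFS by a queue-free monotone fixpoint (recompute the successor
-- set of everything reached so far each round until it saturates, counting growth rounds);
-- same return value, objective: alternative (B re-scans the reached set each round).

-- ===== PORT A =====
-- the dep → dep_rel string transform, shared verbatim by both Pythons
def pvTr (dep : String) : String :=
  PySem.Str.replace (PySem.Str.replace dep "LOGOS_SYSTEM.RUNTIME_BRIDGE.Radial_Genesis_Engine." "") "." "/" ++ ".py"

-- graph.get(m, {}).get("internal_dependencies", [])
def pvDeps (graph : List (String × List (String × List String))) (m : String) : List String :=
  PySem.Dict.getD (PySem.Dict.mk (PySem.Dict.getD (PySem.Dict.mk graph) m [])) "internal_dependencies" []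

-- one inner-loop step of A: visited/next_q
def pvStepA (st : PySem.Set String × List String) (dep : String) : PySem.Set String × List String :=
  let dep_rel := pvTr dep
  if PySem.Set.contains st.1 dep_rel then st
  else (PySem.Set.add st.1 dep_rel, st.2 ++ [dep_rel])

-- A's 'for m in queue: for dep in …' double loop
def pvLevelA (graph : List (String × List (String × List String))) (st : PySem.Set String × List String) (queue : List String) : PySem.Set String × List String :=
  queue.foldl (fun st m => (pvDeps graph m).foldl pvStepA st) st

-- all dep_rel strings that can ever be produced (used only for termination measures)
def pvUniv (graph : List (String × List (String × List String))) : List String :=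
  (graph.flatMap (fun kv => PySem.Dict.getD (PySem.Dict.mk kv.2) "internal_dependencies" [])).map pvTr

-- the list of fresh dep_rel's produced by scanning deps with visited-set v
def pvNew (v : PySem.Set String) : List String → List String
  | [] => []
  | dep :: deps =>
    if PySem.Set.contains v (pvTr dep) then pvNew v deps
    else pvTr dep :: pvNew (v ++ [pvTr dep]) deps

lemma pvGetD_cases (graph : List (String × List (String × List String))) (m : String) :
    PySem.Dict.getD (PySem.Dict.mk graph) m [] = [] ∨
      ∃ kv ∈ graph, PySem.Dict.getD (PySem.Dict.mk graph) m [] = kv.2 := by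
  induction graph with
  | nil => left; rfl
  | cons kv t ih =>
    rw [PySem.Dict.getD_eq_get?_getD, PySem.Dict.get?_mk_cons]
    by_cases h : kv.1 == m
    · simp only [h, if_pos, Option.getD_some]
      right; exact ⟨kv, List.mem_cons_self, rfl⟩
    · simp only [h, Bool.false_eq_true, if_false]
      rw [← PySem.Dict.getD_eq_get?_getD]
      rcases ih with h' | ⟨kv', hm, he⟩
      · left; exact h'
      · right; exact ⟨kv', List.mem_cons_of_mem _ hm, he⟩

lemma pvDeps_cases (graph : List (String × List (String × List String))) (m : String) :
    pvDeps graph m = [] ∨ ∃ kv ∈ graph, pvDeps graph m = PySem.Dict.getD (PySem.Dict.mk kv.2) "internal_dependencies" [] := by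
  unfold pvDeps
  rcases pvGetD_cases graph m with h | ⟨kv, hm, he⟩
  · rw [h]; left; rfl
  · rw [he]; right; exact ⟨kv, hm, rfl⟩

lemma pvDeps_mem_univ (graph : List (String × List (String × List String))) (m x : String)
    (hx : x ∈ pvDeps graph m) : pvTr x ∈ pvUniv graph := by
  rcases pvDeps_cases graph m with h | ⟨kv, hkv, h⟩
  · rw [h] at hx; cases hx
  · rw [h] at hx
    exact List.mem_map_of_mem (List.mem_flatMap.2 ⟨kv, hkv, hx⟩)

lemma pvNew_foldA (deps : List String) : ∀ (v : PySem.Set String) (q : List String),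
    deps.foldl pvStepA (v, q) = (v ++ pvNew v deps, q ++ pvNew v deps) := by
  induction deps with
  | nil => intro v q; simp [pvNew]
  | cons dep deps ih =>
    intro v q
    by_cases hc : PySem.Set.contains v (pvTr dep) = true
    · simp only [List.foldl_cons, pvStepA, hc, if_pos, pvNew]
      exact ih v q
    · simp only [Bool.not_eq_true] at hc
      simp only [List.foldl_cons, pvStepA, hc, Bool.false_eq_true, if_false, pvNew]
      have hadd : PySem.Set.add v (pvTr dep) = v ++ [pvTr dep] := by
        simp only [PySem.Set.add, hc, Bool.false_eq_true, if_false]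
      rw [hadd, ih]
      simp [List.append_assoc]

lemma pvNew_mem (deps : List String) : ∀ (v : PySem.Set String) (x : String),
    x ∈ pvNew v deps → x ∉ v ∧ x ∈ deps.map pvTr := by
  induction deps with
  | nil => intro v x hx; simp [pvNew] at hx
  | cons dep deps ih =>
    intro v x hx
    by_cases hc : PySem.Set.contains v (pvTr dep) = true
    · simp only [pvNew, hc, if_pos] at hx
      rcases ih v x hx with ⟨h1, h2⟩
      exact ⟨h1, List.mem_cons_of_mem _ h2⟩
    · simp only [Bool.not_eq_true] at hc
      simp only [pvNew, hc, Bool.false_eq_true, if_false, List.mem_cons] at hx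
      rcases hx with rfl | hx
      · refine ⟨?_, List.mem_cons_self⟩
        intro hmem
        rw [← PySem.Set.contains_iff] at hmem
        rw [hmem] at hc; cases hc
      · rcases ih _ x hx with ⟨h1, h2⟩
        refine ⟨fun hv => h1 (List.mem_append_left _ hv), List.mem_cons_of_mem _ h2⟩

lemma pvNew_nodup (deps : List String) : ∀ (v : PySem.Set String), (pvNew v deps).Nodup := by
  induction deps with
  | nil => intro v; simp [pvNew]
  | cons dep deps ih =>
    intro v
    by_cases hc : PySem.Set.contains v (pvTr dep) = true
    · simp only [pvNew, hc, if_pos]; exact ih v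
    · simp only [Bool.not_eq_true] at hc
      simp only [pvNew, hc, Bool.false_eq_true, if_false, List.nodup_cons]
      refine ⟨fun hmem => ?_, ih _⟩
      rcases pvNew_mem deps _ _ hmem with ⟨h1, _⟩
      exact h1 (List.mem_append_right _ (List.mem_singleton.2 rfl))

-- fresh dep_rel's produced by a whole level
def pvLvlNew (graph : List (String × List (String × List String))) (v : PySem.Set String) : List String → List String
  | [] => []
  | m :: ms => pvNew v (pvDeps graph m) ++ pvLvlNew graph (v ++ pvNew v (pvDeps graph m)) ms

lemma pvLvlNew_foldA (graph : List (String × List (String × List String))) (queue : List String) :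
    ∀ (v : PySem.Set String) (q : List String),
    pvLevelA graph (v, q) queue = (v ++ pvLvlNew graph v queue, q ++ pvLvlNew graph v queue) := by
  induction queue with
  | nil => intro v q; simp [pvLevelA, pvLvlNew]
  | cons m ms ih =>
    intro v q
    simp only [pvLevelA, List.foldl_cons] at *
    rw [pvNew_foldA, ih]
    simp [pvLvlNew, List.append_assoc]

lemma pvLvlNew_mem (graph : List (String × List (String × List String))) (queue : List String) :
    ∀ (v : PySem.Set String) (x : String),
    x ∈ pvLvlNew graph v queue → x ∉ v ∧ x ∈ pvUniv graph := by
  induction queue with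
  | nil => intro v x hx; simp [pvLvlNew] at hx
  | cons m ms ih =>
    intro v x hx
    simp only [pvLvlNew, List.mem_append] at hx
    rcases hx with hx | hx
    · rcases pvNew_mem _ _ _ hx with ⟨h1, h2⟩
      rcases List.mem_map.1 h2 with ⟨y, hy, rfl⟩
      exact ⟨h1, pvDeps_mem_univ graph m y hy⟩
    · rcases ih _ _ hx with ⟨h1, h2⟩
      exact ⟨fun hv => h1 (List.mem_append_left _ hv), h2⟩

lemma pvLvlNew_nodup (graph : List (String × List (String × List String))) (queue : List String) :
    ∀ (v : PySem.Set String), (pvLvlNew graph v queue).Nodup := by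
  induction queue with
  | nil => intro v; simp [pvLvlNew]
  | cons m ms ih =>
    intro v
    simp only [pvLvlNew]
    rw [List.nodup_append]
    refine ⟨pvNew_nodup _ _, ih _, ?_⟩
    intro x hx x' hx'
    rintro rfl
    rcases pvLvlNew_mem graph ms _ _ hx' with ⟨h1, _⟩
    exact h1 (List.mem_append_right _ hx)

lemma pvNotContains (v : PySem.Set String) (x : String) : (!PySem.Set.contains v x) = true ↔ x ∉ v := by
  cases hb : PySem.Set.contains v x
  · simpa using fun h => by rw [← PySem.Set.contains_iff v x] at h; rw [h] at hb; cases hb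
  · simpa using (PySem.Set.contains_iff v x).1 hb

lemma pvFilter_lt {α : Type} (p q : α → Bool) (l : List α)
    (himp : ∀ x, q x = true → p x = true) (a : α) (ha : a ∈ l)
    (hpa : p a = true) (hqa : q a = false) :
    (l.filter q).length < (l.filter p).length := by
  induction l with
  | nil => cases ha
  | cons b t ih =>
    have hmono : (t.filter q).length ≤ (t.filter p).length :=
      (List.monotone_filter_right t himp).length_le
    rcases List.mem_cons.1 ha with rfl | hat
    · simp only [List.filter_cons, hpa, hqa, Bool.false_eq_true, if_false, if_pos, List.length_cons]
      omega
    · have := ih hat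
      simp only [List.filter_cons]
      by_cases hqb : q b = true
      · simp [hqb, himp b hqb]; omega
      · simp only [Bool.not_eq_true] at hqb
        simp only [hqb, Bool.false_eq_true, if_false]
        by_cases hpb : p b = true
        · simp [hpb]; omega
        · simp only [Bool.not_eq_true] at hpb
          simp [hpb]; omega

lemma pvCount (l : List String) (new : List String) :
    ∀ (v : PySem.Set String), new.Nodup → (∀ x ∈ new, x ∈ l ∧ x ∉ v) →
    (l.filter (fun x => !PySem.Set.contains (v ++ new) x)).length + new.length ≤
      (l.filter (fun x => !PySem.Set.contains v x)).length := by
  induction new with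
  | nil => intro v _ _; simp
  | cons a t ih =>
    intro v hnd hmem
    have hal : a ∈ l := (hmem a List.mem_cons_self).1
    have hav : a ∉ v := (hmem a List.mem_cons_self).2
    have step1 : (l.filter (fun x => !PySem.Set.contains (v ++ [a]) x)).length <
        (l.filter (fun x => !PySem.Set.contains v x)).length := by
      refine pvFilter_lt _ _ l (fun x hx => ?_) a hal ?_ ?_
      · rw [pvNotContains] at hx ⊢
        exact fun h => hx (List.mem_append_left _ h)
      · rw [pvNotContains]
        exact hav
      · rw [Bool.not_eq_false', PySem.Set.contains_iff]
        exact List.mem_append_right _ List.mem_cons_self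
    have step2 := ih (v ++ [a]) (List.nodup_cons.1 hnd).2 (fun x hx => by
      rcases hmem x (List.mem_cons_of_mem _ hx) with ⟨h1, h2⟩
      refine ⟨h1, fun hx' => ?_⟩
      rcases List.mem_append.1 hx' with h | h
      · exact h2 h
      · exact (List.nodup_cons.1 hnd).1 (by
          rcases List.mem_singleton.1 h with rfl; exact hx))
    rw [List.append_assoc] at step2
    simp only [List.singleton_append] at step2
    simp only [List.length_cons]
    omega

-- A's while loop: level-synchronised BFS with a depth counter
def pvLoopA (graph : List (String × List (String × List String))) (visited : PySem.Set String) (queue : List String) (depth : Int) : Int :=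
  match queue with
  | [] => depth
  | _ :: _ =>
    let p := pvLevelA graph (visited, []) queue
    pvLoopA graph p.1 p.2 (if p.2 = [] then depth else depth + 1)
termination_by ((pvUniv graph).filter (fun x => !PySem.Set.contains visited x)).length * 2 + (if queue = [] then 0 else 1)
decreasing_by
  simp only [pvLvlNew_foldA, List.nil_append]
  by_cases hN : pvLvlNew graph visited queue = []
  · simp [hN]
  · have hcnt := pvCount (pvUniv graph) (pvLvlNew graph visited queue) visited
      (pvLvlNew_nodup graph queue visited)
      (fun x hx => by
        rcases pvLvlNew_mem graph queue visited x hx with ⟨h1, h2⟩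
        exact ⟨h2, h1⟩)
    have hlen : 1 ≤ (pvLvlNew graph visited queue).length := by
      cases hN' : pvLvlNew graph visited queue with
      | nil => exact absurd hN' hN
      | cons a b => simp
    simp only [if_neg hN]
    omega

def compute_depth (module_path : String) (graph : List (String × List (String × List String))) : Int :=
  pvLoopA graph PySem.Set.empty [module_path] 0

-- ===== PORT B =====
-- B's inner helper succs(nodes): 'out = set(); for m in nodes: for dep in …: out.add(tr(dep))'
def pvSuccs (graph : List (String × List (String × List String))) (nodes : List String) : PySem.Set String :=
  nodes.foldl (fun out m => (pvDeps graph m).foldl (fun out dep => PySem.Set.add out (pvTr dep)) out) PySem.Set.empty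

-- membership in B's succs fold (needed by pvLoopC's termination proof)
lemma pvMem_succs_fold (graph : List (String × List (String × List String))) (nodes : List String) :
    ∀ (acc : PySem.Set String) (x : String),
    x ∈ nodes.foldl (fun out m => (pvDeps graph m).foldl (fun out dep => PySem.Set.add out (pvTr dep)) out) acc ↔
      x ∈ acc ∨ ∃ m ∈ nodes, ∃ d ∈ pvDeps graph m, x = pvTr d := by
  induction nodes with
  | nil => intro acc x; simp
  | cons m ms ih =>
    intro acc x
    simp only [List.foldl_cons]
    rw [ih, PySem.Set.mem_foldl_add]
    simp only [List.mem_cons]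
    constructor
    · rintro ((h | ⟨d, hd, rfl⟩) | ⟨m', hm', d, hd, rfl⟩)
      · exact Or.inl h
      · exact Or.inr ⟨m, Or.inl rfl, d, hd, rfl⟩
      · exact Or.inr ⟨m', Or.inr hm', d, hd, rfl⟩
    · rintro (h | ⟨m', hm' | hm', d, hd, rfl⟩)
      · exact Or.inl (Or.inl h)
      · exact Or.inl (Or.inr ⟨d, by rw [hm'] at hd; exact ⟨hd, rfl⟩⟩)
      · exact Or.inr ⟨m', hm', d, hd, rfl⟩

lemma pvMem_succs (graph : List (String × List (String × List String))) (nodes : List String) (x : String) :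
    x ∈ pvSuccs graph nodes ↔ ∃ m ∈ nodes, ∃ d ∈ pvDeps graph m, x = pvTr d := by
  unfold pvSuccs
  rw [pvMem_succs_fold]
  simp [PySem.Set.empty]

lemma pvSuccs_sub_univ (graph : List (String × List (String × List String))) (nodes : List String) (x : String)
    (hx : x ∈ pvSuccs graph nodes) : x ∈ pvUniv graph := by
  rcases (pvMem_succs graph nodes x).1 hx with ⟨m, _, d, hd, rfl⟩
  exact pvDeps_mem_univ graph m d hd

-- B's while loop: saturate the reached set, counting growth rounds
def pvLoopC (graph : List (String × List (String × List String))) (reach cur : PySem.Set String) (depth : Int) : Int :=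
  if PySem.Set.issubset cur reach then depth
  else pvLoopC graph (PySem.Set.union reach cur) (pvSuccs graph (PySem.Set.union reach cur)) (depth + 1)
termination_by ((pvUniv graph).filter (fun x => !PySem.Set.contains reach x)).length +
  (cur.filter (fun x => !PySem.Set.contains reach x && !PySem.Set.contains (pvUniv graph) x)).length
decreasing_by
  rename_i h
  have hex : ∃ a ∈ cur, a ∉ reach := by
    by_contra hc
    refine h ((PySem.Set.issubset_iff cur reach).2 fun x hx => ?_)
    by_contra hxr
    exact hc ⟨x, hx, hxr⟩
  rcases hex with ⟨a, hac, har⟩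
  have hmono : ∀ x, (!PySem.Set.contains (PySem.Set.union reach cur) x) = true →
      (!PySem.Set.contains reach x) = true := by
    intro x hx
    rw [pvNotContains] at hx ⊢
    exact fun hm => hx ((PySem.Set.mem_union _ _ _).2 (Or.inl hm))
  have ht2' : (pvSuccs graph (PySem.Set.union reach cur)).filter
      (fun x => !PySem.Set.contains (PySem.Set.union reach cur) x &&
        !PySem.Set.contains (pvUniv graph) x) = [] := by
    rw [List.filter_eq_nil_iff]
    intro x hx
    have hu : PySem.Set.contains (pvUniv graph) x = true :=
      (PySem.Set.contains_iff _ _).2 (pvSuccs_sub_univ graph _ x hx)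
    rw [hu]
    simp
  rw [ht2']
  by_cases hau : a ∈ pvUniv graph
  · have ht1 : ((pvUniv graph).filter (fun x => !PySem.Set.contains (PySem.Set.union reach cur) x)).length <
        ((pvUniv graph).filter (fun x => !PySem.Set.contains reach x)).length := by
      refine pvFilter_lt _ _ (pvUniv graph) hmono a hau ?_ ?_
      · rw [pvNotContains]; exact har
      · rw [Bool.not_eq_false', PySem.Set.contains_iff]
        exact (PySem.Set.mem_union _ _ _).2 (Or.inr hac)
    simp only [List.length_nil]
    omega
  · have ht1 : ((pvUniv graph).filter (fun x => !PySem.Set.contains (PySem.Set.union reach cur) x)).length ≤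
        ((pvUniv graph).filter (fun x => !PySem.Set.contains reach x)).length :=
      (List.monotone_filter_right (pvUniv graph) hmono).length_le
    have ht2 : 1 ≤ (cur.filter (fun x => !PySem.Set.contains reach x &&
        !PySem.Set.contains (pvUniv graph) x)).length := by
      have ham : a ∈ cur.filter (fun x => !PySem.Set.contains reach x &&
          !PySem.Set.contains (pvUniv graph) x) := by
        refine List.mem_filter.2 ⟨hac, ?_⟩
        have h1 : (!PySem.Set.contains reach a) = true := (pvNotContains reach a).2 har
        have h2 : (!PySem.Set.contains (pvUniv graph) a) = true :=
          (pvNotContains (pvUniv graph) a).2 hau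
        rw [h1, h2]; rfl
      exact List.length_pos_of_mem ham
    simp only [List.length_nil]
    omega

def compute_depth_alt (module_path : String) (graph : List (String × List (String × List String))) : Int :=
  pvLoopC graph PySem.Set.empty (pvSuccs graph [module_path]) 0

-- ===== PRECONDITION & SPEC =====
def Spec_compute_depth (module_path : String) (graph : List (String × List (String × List String))) (out : Int) : Prop := out = compute_depth_alt module_path graph
instance (module_path : String) (graph : List (String × List (String × List String))) (out : Int) : Decidable (Spec_compute_depth module_path graph out) := by unfold Spec_compute_depth; infer_instance

-- ===== CLAIM (what is proved, stated in full; the proofs are below) =====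
def Claim_equal_compute_depth : Prop := ∀ (module_path : String) (graph : List (String × List (String × List String))), Dom_compute_depth module_path graph → Spec_compute_depth module_path graph (compute_depth module_path graph)

-- ===== LEMMAS AND PROOFS =====

-- 'x is a transformed dependency of some node of S'
def pvSuccP (graph : List (String × List (String × List String))) (S : List String) (x : String) : Prop :=
  ∃ m ∈ S, ∃ d ∈ pvDeps graph m, x = pvTr d

lemma pvMem_succs' (graph : List (String × List (String × List String))) (nodes : List String) (x : String) :
    x ∈ pvSuccs graph nodes ↔ pvSuccP graph nodes x := pvMem_succs graph nodes x

-- exact membership of A's per-node fresh list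
lemma pvMem_pvNew (deps : List String) : ∀ (v : PySem.Set String) (x : String),
    x ∈ pvNew v deps ↔ (∃ d ∈ deps, x = pvTr d) ∧ x ∉ v := by
  induction deps with
  | nil => intro v x; simp [pvNew]
  | cons dep deps ih =>
    intro v x
    by_cases hc : PySem.Set.contains v (pvTr dep) = true
    · have hvm : pvTr dep ∈ v := (PySem.Set.contains_iff v (pvTr dep)).1 hc
      simp only [pvNew, hc, if_pos, ih, List.mem_cons]
      constructor
      · rintro ⟨⟨d, hd, rfl⟩, hnv⟩
        exact ⟨⟨d, Or.inr hd, rfl⟩, hnv⟩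
      · rintro ⟨⟨d, hd | hd, rfl⟩, hnv⟩
        · exact absurd (hd ▸ hvm) hnv
        · exact ⟨⟨d, hd, rfl⟩, hnv⟩
    · simp only [Bool.not_eq_true] at hc
      have hvm : pvTr dep ∉ v := fun h => by
        rw [← PySem.Set.contains_iff] at h; rw [h] at hc; cases hc
      simp only [pvNew, hc, Bool.false_eq_true, if_false, List.mem_cons, ih]
      constructor
      · rintro (rfl | ⟨⟨d, hd, rfl⟩, hnv⟩)
        · exact ⟨⟨dep, Or.inl rfl, rfl⟩, hvm⟩
        · exact ⟨⟨d, Or.inr hd, rfl⟩, fun h => hnv (List.mem_append_left _ h)⟩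
      · rintro ⟨⟨d, hd | hd, rfl⟩, hnv⟩
        · exact Or.inl (by rw [hd])
        · by_cases hx : pvTr d = pvTr dep
          · exact Or.inl hx
          · refine Or.inr ⟨⟨d, hd, rfl⟩, fun h => ?_⟩
            rcases List.mem_append.1 h with h | h
            · exact hnv h
            · exact hx (List.mem_singleton.1 h)

-- exact membership of A's per-level fresh list
lemma pvMem_pvLvlNew (graph : List (String × List (String × List String))) (queue : List String) :
    ∀ (v : PySem.Set String) (x : String),
    x ∈ pvLvlNew graph v queue ↔ pvSuccP graph queue x ∧ x ∉ v := by
  induction queue with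
  | nil => intro v x; simp [pvLvlNew, pvSuccP]
  | cons m ms ih =>
    intro v x
    have hL : x ∈ pvLvlNew graph v (m :: ms) ↔
        x ∈ pvNew v (pvDeps graph m) ∨ x ∈ pvLvlNew graph (v ++ pvNew v (pvDeps graph m)) ms := by
      simp [pvLvlNew]
    rw [hL, pvMem_pvNew, ih]
    simp only [pvSuccP, List.mem_cons]
    constructor
    · rintro (⟨⟨d, hd, rfl⟩, hnv⟩ | ⟨⟨m', hm', d, hd, rfl⟩, hnv⟩)
      · exact ⟨⟨m, Or.inl rfl, d, hd, rfl⟩, hnv⟩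
      · exact ⟨⟨m', Or.inr hm', d, hd, rfl⟩, fun h => hnv (List.mem_append_left _ h)⟩
    · rintro ⟨⟨m', hm' | hm', d, hd, rfl⟩, hnv⟩
      · exact Or.inl ⟨⟨d, by rw [hm'] at hd; exact ⟨hd, rfl⟩⟩, hnv⟩
      · by_cases hx : pvTr d ∈ pvNew v (pvDeps graph m)
        · exact Or.inl ⟨((pvMem_pvNew _ _ _).1 hx).1, hnv⟩
        · refine Or.inr ⟨⟨m', hm', d, hd, rfl⟩, fun h => ?_⟩
          rcases List.mem_append.1 h with h | h
          · exact hnv h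
          · exact hx h

-- main bridge: A's BFS loop equals B's saturation loop under the state invariant
lemma pvLoop_bridge (graph : List (String × List (String × List String))) (v : PySem.Set String) (q : List String) (d : Int) :
    ∀ (reach cur : PySem.Set String),
    (∀ x, x ∈ reach ↔ x ∈ v) →
    (∀ x, x ∉ v → (x ∈ cur ↔ pvSuccP graph q x)) →
    (∀ x, pvSuccP graph v x → x ∈ v ∨ pvSuccP graph q x) →
    pvLoopA graph v q d = pvLoopC graph reach cur d := by
  fun_induction pvLoopA graph v q d with
  | case1 v d =>
    intro reach cur h1 h2 _
    rw [pvLoopC.eq_def]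
    have hsub : PySem.Set.issubset cur reach = true := by
      refine (PySem.Set.issubset_iff cur reach).2 fun x hx => ?_
      by_cases hv : x ∈ v
      · exact (h1 x).2 hv
      · rcases ((h2 x hv).1 hx) with ⟨m, hm, _⟩
        cases hm
    simp [hsub]
  | case2 v d m ms p ih =>
    intro reach cur h1 h2 h3
    set fresh := pvLvlNew graph v (m :: ms) with hfresh
    have hpe : pvLevelA graph (v, []) (m :: ms) = (v ++ fresh, fresh) := by
      simpa [hfresh] using pvLvlNew_foldA graph (m :: ms) v []
    have hmemF : ∀ x, x ∈ fresh ↔ pvSuccP graph (m :: ms) x ∧ x ∉ v :=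
      fun x => pvMem_pvLvlNew graph (m :: ms) v x
    rw [show p = (v ++ fresh, fresh) from hpe] at ih
    rw [hpe]
    by_cases hN : fresh = []
    · -- level produced nothing: A's recursion returns d; B's subset test succeeds
      have hsub : PySem.Set.issubset cur reach = true := by
        refine (PySem.Set.issubset_iff cur reach).2 fun x hx => ?_
        by_cases hv : x ∈ v
        · exact (h1 x).2 hv
        · have : x ∈ fresh := (hmemF x).2 ⟨(h2 x hv).1 hx, hv⟩
          rw [hN] at this; cases this
      have hA : pvLoopA graph (v ++ fresh, fresh).1 (v ++ fresh, fresh).2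
          (if (v ++ fresh, fresh).2 = [] then d else d + 1) = d := by
        simp only [hN, List.append_nil, if_pos]
        rw [pvLoopA.eq_def]
      rw [hA, pvLoopC.eq_def]
      simp [hsub]
    · -- level produced fresh nodes: both loops step
      have hsub : PySem.Set.issubset cur reach = false := by
        rcases List.exists_mem_of_ne_nil fresh hN with ⟨a, ha⟩
        rcases (hmemF a).1 ha with ⟨hsa, hav⟩
        rw [Bool.eq_false_iff]
        intro hss
        have hareach : a ∈ reach := (PySem.Set.issubset_iff cur reach).1 hss a ((h2 a hav).2 hsa)
        exact hav ((h1 a).1 hareach)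
      rw [pvLoopC.eq_def, hsub]
      simp only [Bool.false_eq_true, if_false]
      simp only [if_neg hN, dif_neg hN] at ih ⊢
      have hmemV' : ∀ x, x ∈ v ++ fresh ↔ x ∈ v ∨ x ∈ fresh := fun x => List.mem_append
      have hmemR' : ∀ x, x ∈ PySem.Set.union reach cur ↔ x ∈ v ++ fresh := by
        intro x
        rw [PySem.Set.mem_union, hmemV', h1]
        constructor
        · rintro (h | h)
          · exact Or.inl h
          · by_cases hv : x ∈ v
            · exact Or.inl hv
            · exact Or.inr ((hmemF x).2 ⟨(h2 x hv).1 h, hv⟩)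
        · rintro (h | h)
          · exact Or.inl h
          · rcases (hmemF x).1 h with ⟨hs, hnv⟩
            exact Or.inr ((h2 x hnv).2 hs)
      -- pvSuccP over a list with the same members is the same predicate
      have hsuccExt : ∀ (S T : List String), (∀ y, y ∈ S ↔ y ∈ T) →
          ∀ x, pvSuccP graph S x ↔ pvSuccP graph T x := by
        intro S T hST x
        constructor <;> rintro ⟨m', hm', d', hd', rfl⟩
        · exact ⟨m', (hST m').1 hm', d', hd', rfl⟩
        · exact ⟨m', (hST m').2 hm', d', hd', rfl⟩
      apply ih
      · -- new reach matches new visited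
        intro x; exact hmemR' x
      · -- new cur characterises successors of the new frontier, off new visited
        intro x hxnv
        rw [pvMem_succs']
        rw [hsuccExt _ _ hmemR' x]
        constructor
        · rintro ⟨m', hm', d', hd', rfl⟩
          rcases (hmemV' m').1 hm' with hmv | hmf
          · -- m' already visited: its successors are visited or frontier-successors
            rcases h3 (pvTr d') ⟨m', hmv, d', hd', rfl⟩ with h | h
            · exact absurd ((hmemV' _).2 (Or.inl h)) hxnv
            · by_cases hv : pvTr d' ∈ v
              · exact absurd ((hmemV' _).2 (Or.inl hv)) hxnv
              · exact absurd ((hmemV' _).2 (Or.inr ((hmemF _).2 ⟨h, hv⟩))) hxnv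
          · exact ⟨m', hmf, d', hd', rfl⟩
        · rintro ⟨m', hm', d', hd', rfl⟩
          exact ⟨m', (hmemV' m').2 (Or.inr hm'), d', hd', rfl⟩
      · -- successors of the new visited set are visited or frontier-successors
        intro x hx
        rcases hx with ⟨m', hm', d', hd', rfl⟩
        rcases (hmemV' m').1 hm' with hmv | hmf
        · rcases h3 (pvTr d') ⟨m', hmv, d', hd', rfl⟩ with h | h
          · exact Or.inl ((hmemV' _).2 (Or.inl h))
          · by_cases hv : pvTr d' ∈ v
            · exact Or.inl ((hmemV' _).2 (Or.inl hv))
            · exact Or.inl ((hmemV' _).2 (Or.inr ((hmemF _).2 ⟨h, hv⟩)))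
        · exact Or.inr ⟨m', hmf, d', hd', rfl⟩

-- ===== VERDICT (by name: the statement is the Claim_ definition above) =====
theorem compute_depth_spec : Claim_equal_compute_depth := by
  intro module_path graph _
  show compute_depth module_path graph = compute_depth_alt module_path graph
  unfold compute_depth compute_depth_alt
  apply pvLoop_bridge
  · intro x; simp [PySem.Set.empty]
  · intro x _; exact pvMem_succs' graph [module_path] x
  · intro x hx
    rcases hx with ⟨m, hm, _⟩
    simp [PySem.Set.empty] at hm
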